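-- pv_equiv track=rewrite | github.com/athulkrishna2015/csv-import-plus | detector.py | strip_directive_lines
-- ===== SOURCE A (Python) =====
-- def strip_directive_lines(content: str) -> str:
--     out = []
--     skipping = True
--     for line in content.splitlines():
--         if skipping and line.strip().startswith("#"):
--             continue
--         skipping = skipping and not line.strip()
--         if not skipping:
--             out.append(line)
--     return "\n".join(out)
-- ===== SOURCE B (Python) =====
-- def strip_directive_lines(content: str) -> str:
--     lines = content.splitlines()
--     start = 0
--     while start < len(lines) and (
--         not lines[start].strip() or lines[start].strip().startswith("#")
--     ):
--         start += 1
--     return "\n".join(lines[start:])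
-- ===== Notes on version B (the rewrite author's own statement) =====
-- stated objective: simpler
-- what changed: B finds the boundary index of the first non-blank, non-comment line and joins the whole suffix at once, instead of A's output accumulator with a latching boolean flag inside a full-list loop.
import Mathlib
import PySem

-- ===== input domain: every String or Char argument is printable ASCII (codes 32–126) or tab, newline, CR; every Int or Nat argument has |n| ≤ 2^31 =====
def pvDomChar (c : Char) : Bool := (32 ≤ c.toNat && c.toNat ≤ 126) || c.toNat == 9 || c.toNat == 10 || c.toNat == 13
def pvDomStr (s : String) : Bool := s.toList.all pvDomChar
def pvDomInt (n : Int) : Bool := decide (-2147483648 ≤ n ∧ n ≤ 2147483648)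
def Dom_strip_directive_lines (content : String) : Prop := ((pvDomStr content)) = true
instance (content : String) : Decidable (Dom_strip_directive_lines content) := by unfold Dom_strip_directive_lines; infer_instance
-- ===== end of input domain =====

-- B computes the boundary index (dropWhile over the lines) and joins the suffix at once,
-- instead of A's accumulator + latching boolean flag; objective: simpler.


-- ===== PORT A =====
-- one loop step: state is (out, skipping)
def stripDirStepA (st : List String × Bool) (line : String) : List String × Bool :=
  if st.2 && PySem.Str.startswith (PySem.Str.strip line) "#" then st
  else
    let skipping' := st.2 && (PySem.Str.strip line == "")
    if !skipping' then (st.1 ++ [line], skipping') else (st.1, skipping')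

def strip_directive_lines (content : String) : String :=
  PySem.Str.join "\n" ((PySem.Str.splitlines content).foldl stripDirStepA ([], true)).1

-- ===== PORT B =====
-- blank-or-comment predicate of Source B's while loop
def stripDirSkipB (line : String) : Bool :=
  (PySem.Str.strip line == "") || PySem.Str.startswith (PySem.Str.strip line) "#"

def strip_directive_lines_alt (content : String) : String :=
  -- the while loop advancing `start` and taking lines[start:] is exactly dropWhile
  PySem.Str.join "\n" ((PySem.Str.splitlines content).dropWhile stripDirSkipB)

-- ===== PRECONDITION & SPEC =====
def Spec_strip_directive_lines (content : String) (out : String) : Prop := out = strip_directive_lines_alt content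
instance (content : String) (out : String) : Decidable (Spec_strip_directive_lines content out) := by unfold Spec_strip_directive_lines; infer_instance

-- ===== CLAIM (what is proved, stated in full; the proofs are below) =====
def Claim_equal_strip_directive_lines : Prop := ∀ (content : String), Dom_strip_directive_lines content → Spec_strip_directive_lines content (strip_directive_lines content)

-- ===== LEMMAS AND PROOFS =====

-- once skipping is false, A appends every remaining line
theorem foldl_stepA_false (ls : List String) (out : List String) :
    ls.foldl stripDirStepA (out, false) = (out ++ ls, false) := by
  induction ls generalizing out with
  | nil => simp
  | cons l t ih => simp [List.foldl, stripDirStepA, ih]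

-- from the initial state, A's accumulator is the dropWhile suffix
theorem foldl_stepA_true (ls : List String) :
    (ls.foldl stripDirStepA ([], true)).1 = ls.dropWhile stripDirSkipB := by
  induction ls with
  | nil => simp
  | cons l t ih =>
    by_cases hc : PySem.Chars.startswith (PySem.Chars.strip l.toList) ['#'] = true
    · simp [List.foldl, stripDirStepA, stripDirSkipB, hc, ih, List.dropWhile]
    · by_cases hb : PySem.Str.strip l = ""
      · simp [List.foldl, stripDirStepA, stripDirSkipB, hb, ih, List.dropWhile]
      · have hb' : (PySem.Str.strip l == "") = false := by simp [hb]
        simp [List.foldl, stripDirStepA, stripDirSkipB, hc, hb', List.dropWhile,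
              foldl_stepA_false]

-- ===== VERDICT (by name: the statement is the Claim_ definition above) =====
theorem strip_directive_lines_spec : Claim_equal_strip_directive_lines := by
  intro content _
  unfold Spec_strip_directive_lines strip_directive_lines strip_directive_lines_alt
  rw [foldl_stepA_true]
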